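-- pv_equiv track=rewrite | github.com/sofuncheung/csld | csld_20180609.py | componont_equal_by_sym
-- ===== SOURCE A (Python) =====
-- def componont_equal_by_sym(a, b, index):
--     '''
--     a, b are (x, x, y, y, z, z) stuff produced by itertool.product('x','y','z')
--     '''
--     dic = {}
--     for i in index:
--         temp = [x for x in range(len(index)) if index[x] == i]
--         dic[i] = temp
--     for key in dic:
--         temp_a = []
--         temp_b = []
--         for i in dic[key]:
--             temp_a.append(a[i])
--             temp_b.append(b[i])
--         if temp_a.count('x') == temp_b.count('x') and temp_a.count('y') == temp_b.count('y') and temp_a.count('z') == temp_b.count('z'):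
--             continue
--         else:
--             return False
--     return True
-- ===== SOURCE B (Python) =====
-- def componont_equal_by_sym(a, b, index):
--     # One pass per list: count (index-value, letter) pairs with +1 for a and -1
--     # for b in a single dict of deltas; all deltas zero iff every index group
--     # has equal x/y/z counts.
--     delta = {}
--     for p in zip(index, a):
--         if p[1] in ('x', 'y', 'z'):
--             delta[p] = delta.get(p, 0) + 1
--     for p in zip(index, b):
--         if p[1] in ('x', 'y', 'z'):
--             delta[p] = delta.get(p, 0) - 1
--     return all(v == 0 for v in delta.values())
-- ===== Notes on version B (the rewrite author's own statement) =====
-- stated objective: faster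
-- what changed: Replaces A's quadratic rebuild of the position list for every index entry and per-group recounting by a single linear pass that accumulates signed (index,letter) pair counts in one dict and checks that all deltas are zero.
-- outside the precondition, e.g. on componont_equal_by_sym(['x'], ['y'], [0, 1]): A returns False, B returns False
import Mathlib
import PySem

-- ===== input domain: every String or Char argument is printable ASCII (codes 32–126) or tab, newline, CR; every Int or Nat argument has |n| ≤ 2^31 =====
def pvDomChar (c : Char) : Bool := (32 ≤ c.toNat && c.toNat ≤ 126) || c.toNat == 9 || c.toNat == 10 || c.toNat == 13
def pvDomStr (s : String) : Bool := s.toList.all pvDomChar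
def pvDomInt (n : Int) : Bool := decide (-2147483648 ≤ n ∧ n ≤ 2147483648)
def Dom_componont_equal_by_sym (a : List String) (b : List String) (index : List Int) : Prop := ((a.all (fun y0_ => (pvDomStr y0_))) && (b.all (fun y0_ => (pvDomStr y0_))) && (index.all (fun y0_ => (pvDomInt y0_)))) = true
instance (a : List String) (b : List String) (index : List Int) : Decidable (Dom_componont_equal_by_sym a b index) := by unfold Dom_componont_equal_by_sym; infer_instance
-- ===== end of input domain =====

-- B replaces A's quadratic per-entry position scans by one linear pass of signed
-- (index,letter) pair counts in a dict; equivalence proved on inputs where index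
-- positions are valid in a and b.


-- ===== PORT A =====
-- the 'for key in dic' loop with its early 'return False'
def pvGroupLoopA (a : List String) (b : List String) (dic : PySem.Dict Int (List Int)) : List Int → Bool
  | [] => true
  | key :: rest =>
    let pos := dic.getD key []
    let tab := pos.foldl (fun (acc : List String × List String) i =>
        (acc.1 ++ [PySem.List.pyGetD a i ""], acc.2 ++ [PySem.List.pyGetD b i ""])) ([], [])
    if tab.1.count "x" == tab.2.count "x" && tab.1.count "y" == tab.2.count "y"
        && tab.1.count "z" == tab.2.count "z"
    then pvGroupLoopA a b dic rest
    else false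

def componont_equal_by_sym (a : List String) (b : List String) (index : List Int) : Bool :=
  let dic : PySem.Dict Int (List Int) :=
    index.foldl (fun d i =>
      d.insert i ((PySem.List.pyRange 0 (index.length : Int) 1).filter
        (fun x => PySem.List.pyGetD index x 0 == i))) PySem.Dict.empty
  pvGroupLoopA a b dic dic.keys

-- ===== PORT B =====
def pvIsXYZ (s : String) : Bool := s == "x" || s == "y" || s == "z"

def componont_equal_by_sym_alt (a : List String) (b : List String) (index : List Int) : Bool :=
  let d1 := (index.zip a).foldl
    (fun (d : PySem.Dict (Int × String) Int) p =>
      if pvIsXYZ p.2 then d.insert p (d.getD p 0 + 1) else d) PySem.Dict.empty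
  let d2 := (index.zip b).foldl
    (fun (d : PySem.Dict (Int × String) Int) p =>
      if pvIsXYZ p.2 then d.insert p (d.getD p 0 - 1) else d) d1
  d2.values.all (fun v => v == 0)

-- ===== PRECONDITION & SPEC =====
-- Pre_ excludes inputs where a or b is shorter than index: there A raises
-- IndexError except when an earlier complete group already differs (then A
-- returns False before reaching the bad position).
def Pre_componont_equal_by_sym (a : List String) (b : List String) (index : List Int) : Prop :=
  index.length ≤ a.length ∧ index.length ≤ b.length
instance (a : List String) (b : List String) (index : List Int) : Decidable (Pre_componont_equal_by_sym a b index) := by unfold Pre_componont_equal_by_sym; infer_instance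

def pvWitness_componont_equal_by_sym : List String × List String × List Int :=
  (["x", "y"], ["y", "x"], [0, 0])

def Spec_componont_equal_by_sym (a : List String) (b : List String) (index : List Int) (out : Bool) : Prop := out = componont_equal_by_sym_alt a b index
instance (a : List String) (b : List String) (index : List Int) (out : Bool) : Decidable (Spec_componont_equal_by_sym a b index out) := by unfold Spec_componont_equal_by_sym; infer_instance

-- ===== CLAIM (what is proved, stated in full; the proofs are below) =====
def Claim_equal_componont_equal_by_sym : Prop := ∀ (a : List String) (b : List String) (index : List Int), Dom_componont_equal_by_sym a b index → Pre_componont_equal_by_sym a b index → Spec_componont_equal_by_sym a b index (componont_equal_by_sym a b index)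

-- ===== LEMMAS AND PROOFS =====

-- the filtered (index value, letter) pair lists both programs are really counting
def pvFa (index : List Int) (xs : List String) : List (Int × String) :=
  (index.zip xs).filter (fun p => pvIsXYZ p.2)

-- the body of one iteration of A's key loop
def pvCheckA (a : List String) (b : List String) (dic : PySem.Dict Int (List Int)) (key : Int) : Bool :=
  let pos := dic.getD key []
  let tab := pos.foldl (fun (acc : List String × List String) i =>
      (acc.1 ++ [PySem.List.pyGetD a i ""], acc.2 ++ [PySem.List.pyGetD b i ""])) ([], [])
  tab.1.count "x" == tab.2.count "x" && tab.1.count "y" == tab.2.count "y"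
      && tab.1.count "z" == tab.2.count "z"

lemma pvGroupLoopA_all (a : List String) (b : List String) (dic : PySem.Dict Int (List Int))
    (l : List Int) : pvGroupLoopA a b dic l = l.all (pvCheckA a b dic) := by
  induction l with
  | nil => rfl
  | cons x tl ih =>
    simp only [pvGroupLoopA, pvCheckA, List.all_cons, ih]
    by_cases h :
      (let pos := dic.getD x [];
       let tab := pos.foldl (fun (acc : List String × List String) i =>
          (acc.1 ++ [PySem.List.pyGetD a i ""], acc.2 ++ [PySem.List.pyGetD b i ""])) ([], []);
       tab.1.count "x" == tab.2.count "x" && tab.1.count "y" == tab.2.count "y"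
          && tab.1.count "z" == tab.2.count "z") = true <;>
      simp [h]

lemma pvRange_map_pair (ix : List Int) (xs : List String) (h : ix.length ≤ xs.length) :
    (PySem.List.pyRange 0 (ix.length : Int) 1).map
      (fun j => (PySem.List.pyGetD ix j 0, PySem.List.pyGetD xs j "")) = ix.zip xs := by
  apply List.ext_getElem
  · simp [PySem.List.length_pyRange_one]
    omega
  · intro i h1 h2
    have hi : i < ix.length := by
      simpa [PySem.List.length_pyRange_one] using h1
    have hix : i < xs.length := lt_of_lt_of_le hi h
    simp [PySem.List.getElem_pyRange_one, List.getElem_zip, hi,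
      PySem.List.pyGetD_of_nonneg, hix]

lemma getD_foldl_insert_fun (l : List Int) (v : Int → List Int)
    (d : PySem.Dict Int (List Int)) (k : Int) (dflt : List Int) :
    (l.foldl (fun d i => d.insert i (v i)) d).getD k dflt
      = if k ∈ l then v k else d.getD k dflt := by
  induction l generalizing d with
  | nil => simp
  | cons x tl ih =>
    rw [List.foldl_cons, ih]
    by_cases hk : k ∈ tl
    · simp [hk]
    · by_cases hx : k = x <;> simp [hk, hx, PySem.Dict.getD_insert]

lemma getD_foldl_insert_sub_one (l : List (Int × String))
    (d : PySem.Dict (Int × String) Int) (v : Int × String) :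
    (l.foldl (fun d x => d.insert x (d.getD x 0 - 1)) d).getD v 0
      = d.getD v 0 - l.count v := by
  induction l generalizing d with
  | nil => simp
  | cons x tl ih =>
    rw [List.foldl_cons, ih, PySem.Dict.getD_insert, List.count_cons]
    by_cases hx : v = x
    · simp only [hx, beq_self_eq_true, if_pos]
      push_cast
      ring
    · simp [hx, Ne.symm hx]

lemma count_tempA (ix : List Int) (xs : List String) (h : ix.length ≤ xs.length)
    (k : Int) (c : String) (hc : pvIsXYZ c = true) :
    (((PySem.List.pyRange 0 (ix.length : Int) 1).filter
        (fun x => PySem.List.pyGetD ix x 0 == k)).map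
        (fun i => PySem.List.pyGetD xs i "")).count c = (pvFa ix xs).count (k, c) := by
  rw [pvFa, List.count_filter (by simpa using hc), ← pvRange_map_pair ix xs h]
  rw [List.count_eq_countP, List.count_eq_countP]
  rw [List.countP_map, List.countP_map, List.countP_filter]
  apply List.countP_congr
  intro j _
  by_cases h1 : PySem.List.pyGetD ix j 0 = k <;>
    by_cases h2 : PySem.List.pyGetD xs j "" = c <;>
    simp [Function.comp, h1, h2, Prod.ext_iff]

lemma B_char (a : List String) (b : List String) (index : List Int) :
    componont_equal_by_sym_alt a b index = true ↔
      ∀ p, p ∈ pvFa index a ∨ p ∈ pvFa index b →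
        (pvFa index a).count p = (pvFa index b).count p := by
  simp only [componont_equal_by_sym_alt, PySem.List.foldl_if_eq_foldl_filter]
  set fa := (index.zip a).filter (fun p => pvIsXYZ p.2) with hfa
  set fb := (index.zip b).filter (fun p => pvIsXYZ p.2) with hfb
  have hfa' : fa = pvFa index a := rfl
  have hfb' : fb = pvFa index b := rfl
  set d1 := fa.foldl (fun d p => d.insert p (d.getD p 0 + 1))
      (PySem.Dict.empty : PySem.Dict (Int × String) Int) with hd1
  set d2 := fb.foldl (fun d p => d.insert p (d.getD p 0 - 1)) d1 with hd2
  have hnd1 : d1.keys.Nodup := by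
    rw [hd1]; exact PySem.Dict.nodup_keys_foldl_insert _ _ _ (by simp)
  have hnd2 : d2.keys.Nodup := by
    rw [hd2]; exact PySem.Dict.nodup_keys_foldl_insert _ _ _ hnd1
  have hkeys : ∀ p, p ∈ d2.keys ↔ p ∈ fa ∨ p ∈ fb := by
    intro p
    rw [hd2, PySem.Dict.keys_foldl_insert, PySem.Set.mem_update, hd1,
      PySem.Dict.keys_foldl_insert]
    simp [PySem.Set.mem_update]
  have hget : ∀ p, d2.getD p 0 = (fa.count p : Int) - (fb.count p : Int) := by
    intro p
    rw [hd2, getD_foldl_insert_sub_one, hd1, PySem.Dict.getD_foldl_insert_add_one]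
    simp
  rw [PySem.Dict.values_eq_map_keys d2 hnd2 0]
  rw [List.all_map, List.all_eq_true]
  constructor
  · intro H p hp
    have := H p ((hkeys p).mpr (by rw [hfa', hfb']; exact hp))
    simp only [Function.comp, hget p, beq_iff_eq] at this
    rw [hfa', hfb'] at this
    omega
  · intro H p hp
    have := H p (by rw [← hfa', ← hfb']; exact (hkeys p).mp hp)
    simp only [Function.comp, hget p, beq_iff_eq]
    rw [hfa', hfb']
    omega

lemma A_char (a : List String) (b : List String) (index : List Int)
    (h1 : index.length ≤ a.length) (h2 : index.length ≤ b.length) :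
    componont_equal_by_sym a b index = true ↔
      ∀ k ∈ index,
        (pvFa index a).count (k, "x") = (pvFa index b).count (k, "x") ∧
        (pvFa index a).count (k, "y") = (pvFa index b).count (k, "y") ∧
        (pvFa index a).count (k, "z") = (pvFa index b).count (k, "z") := by
  unfold componont_equal_by_sym
  rw [pvGroupLoopA_all]
  have hkeys : (index.foldl (fun d i =>
      d.insert i ((PySem.List.pyRange 0 (index.length : Int) 1).filter
        (fun x => PySem.List.pyGetD index x 0 == i))) PySem.Dict.empty).keys
      = PySem.Set.ofList index := by
    rw [PySem.Dict.keys_foldl_insert]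
    rfl
  rw [hkeys, List.all_eq_true]
  have hmem : ∀ k, k ∈ PySem.Set.ofList index ↔ k ∈ index :=
    fun k => PySem.Set.mem_ofList index k
  constructor
  · intro H k hk
    have hck := H k ((hmem k).mpr hk)
    rw [pvCheckA] at hck
    simp only [getD_foldl_insert_fun, hk, if_pos] at hck
    rw [PySem.List.foldl_prod_mk (f := fun acc i => acc ++ [PySem.List.pyGetD a i ""])
      (g := fun acc i => acc ++ [PySem.List.pyGetD b i ""])] at hck
    simp only [PySem.List.foldl_append_singleton_eq_map, List.nil_append] at hck
    rw [count_tempA index a h1 k "x" (by decide), count_tempA index b h2 k "x" (by decide),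
      count_tempA index a h1 k "y" (by decide), count_tempA index b h2 k "y" (by decide),
      count_tempA index a h1 k "z" (by decide), count_tempA index b h2 k "z" (by decide)] at hck
    simp only [Bool.and_eq_true, beq_iff_eq] at hck
    exact ⟨hck.1.1, hck.1.2, hck.2⟩
  · intro H k hk
    have hk' := (hmem k).mp hk
    rw [pvCheckA]
    simp only [getD_foldl_insert_fun, hk', if_pos]
    rw [PySem.List.foldl_prod_mk (f := fun acc i => acc ++ [PySem.List.pyGetD a i ""])
      (g := fun acc i => acc ++ [PySem.List.pyGetD b i ""])]
    simp only [PySem.List.foldl_append_singleton_eq_map, List.nil_append]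
    rw [count_tempA index a h1 k "x" (by decide), count_tempA index b h2 k "x" (by decide),
      count_tempA index a h1 k "y" (by decide), count_tempA index b h2 k "y" (by decide),
      count_tempA index a h1 k "z" (by decide), count_tempA index b h2 k "z" (by decide)]
    simp only [Bool.and_eq_true, beq_iff_eq]
    exact ⟨⟨(H k hk').1, (H k hk').2.1⟩, (H k hk').2.2⟩

lemma mem_pvFa (index : List Int) (xs : List String) (p : Int × String)
    (hp : p ∈ pvFa index xs) : p.1 ∈ index ∧ pvIsXYZ p.2 = true := by
  rw [pvFa, List.mem_filter] at hp
  exact ⟨(List.of_mem_zip hp.1).1, hp.2⟩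

lemma count_eq_of_all (index : List Int) (a b : List String)
    (H : ∀ p, p ∈ pvFa index a ∨ p ∈ pvFa index b →
      (pvFa index a).count p = (pvFa index b).count p) (k : Int) (c : String) :
    (pvFa index a).count (k, c) = (pvFa index b).count (k, c) := by
  by_cases hm : (k, c) ∈ pvFa index a ∨ (k, c) ∈ pvFa index b
  · exact H _ hm
  · rw [not_or] at hm
    rw [List.count_eq_zero_of_not_mem hm.1, List.count_eq_zero_of_not_mem hm.2]

lemma pvIsXYZ_cases (c : String) (hc : pvIsXYZ c = true) :
    c = "x" ∨ c = "y" ∨ c = "z" := by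
  rw [pvIsXYZ] at hc
  have h2 : (c = "x" ∨ c = "y") ∨ c = "z" := by simpa using hc
  tauto

-- ===== VERDICT (by name: the statement is the Claim_ definition above) =====
theorem componont_equal_by_sym_spec : Claim_equal_componont_equal_by_sym := by
  intro a b index _ hpre
  unfold Spec_componont_equal_by_sym
  have hA := A_char a b index hpre.1 hpre.2
  have hB := B_char a b index
  have hiff : componont_equal_by_sym a b index = true ↔
      componont_equal_by_sym_alt a b index = true := by
    rw [hA, hB]
    constructor
    · intro H p hp
      obtain ⟨k, c⟩ := p
      have hm : k ∈ index ∧ pvIsXYZ c = true := by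
        rcases hp with hp | hp
        · exact mem_pvFa index a (k, c) hp
        · exact mem_pvFa index b (k, c) hp
      rcases pvIsXYZ_cases c hm.2 with rfl | rfl | rfl
      · exact (H k hm.1).1
      · exact (H k hm.1).2.1
      · exact (H k hm.1).2.2
    · intro H k _
      exact ⟨count_eq_of_all index a b H k "x", count_eq_of_all index a b H k "y",
        count_eq_of_all index a b H k "z"⟩
  cases hx : componont_equal_by_sym a b index <;>
    cases hy : componont_equal_by_sym_alt a b index <;> simp_all
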